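-- pv_equiv track=rewrite | github.com/laik/Vinbero | docs/performance/srv6_end_m_gtp4_e_for_bench.py | emb_byte_in_byte
-- ===== SOURCE A (Python) =====
-- def emb_byte_in_byte(dbyte, sbyte, size, offset, shift):
--     for i in range(size):
--         if shift !=0 :
--             dbyte[offset+i] |= (sbyte[i] >> shift)&0xff
--             dbyte[offset+1+i] |= (sbyte[i] << (8 - shift))&0xff
--         else:
--             dbyte[offset+i] = sbyte[i]
--     return dbyte
-- ===== SOURCE B (Python) =====
-- def emb_byte_in_byte(dbyte, sbyte, size, offset, shift):
--     # Carry pipeline: one destination position per step (OR in the pending low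
--     # part of the previous source byte, then the high part of the current one),
--     # instead of A's two scattered writes per iteration.
--     # Mutates dbyte in place, like A; returns it.
--     src = sbyte[:max(size, 0)]
--     if not src:
--         return dbyte
--     if shift == 0:
--         for j, v in enumerate(src):
--             dbyte[offset + j] = v
--     else:
--         carry = 0
--         for j, v in enumerate(src):
--             dbyte[offset + j] |= carry
--             dbyte[offset + j] |= (v >> shift) & 0xff
--             carry = (v << (8 - shift)) & 0xff
--         dbyte[offset + len(src)] |= carry
--     return dbyte
-- ===== Notes on version B (the rewrite author's own statement) =====
-- stated objective: alternative
-- what changed: Replaces A's two scattered OR-writes per source byte (at offset+i and offset+1+i) with a carry pipeline that visits each destination position exactly once in order, ORing in the pending low part of the previous byte and then the high part of the current one, with one trailing carry flush; the shift==0 case becomes a plain enumerate copy over a slice.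
import Mathlib
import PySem

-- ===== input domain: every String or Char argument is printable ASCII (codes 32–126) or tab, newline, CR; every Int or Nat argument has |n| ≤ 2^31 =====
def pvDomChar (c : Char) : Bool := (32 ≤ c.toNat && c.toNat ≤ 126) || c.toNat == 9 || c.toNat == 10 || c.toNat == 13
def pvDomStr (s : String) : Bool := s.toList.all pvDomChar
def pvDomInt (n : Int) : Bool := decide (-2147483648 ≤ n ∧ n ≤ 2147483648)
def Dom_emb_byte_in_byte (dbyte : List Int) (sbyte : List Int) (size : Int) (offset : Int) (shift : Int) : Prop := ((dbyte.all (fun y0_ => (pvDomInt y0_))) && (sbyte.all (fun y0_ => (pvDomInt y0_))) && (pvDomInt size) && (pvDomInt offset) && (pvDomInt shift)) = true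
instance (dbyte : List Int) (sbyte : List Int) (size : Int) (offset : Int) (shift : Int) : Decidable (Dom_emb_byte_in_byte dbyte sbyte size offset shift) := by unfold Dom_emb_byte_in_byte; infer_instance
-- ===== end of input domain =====

-- B replaces A's two scattered OR-writes per source byte with a single-position-per-step
-- carry pipeline (objective: alternative, same cost); both mutate dbyte in Python, the
-- equivalence proved here is about the returned list.


-- ===== PORT A =====
def emb_byte_in_byte (dbyte : List Int) (sbyte : List Int) (size : Int) (offset : Int) (shift : Int) : List Int :=
  (PySem.List.pyRange 0 size).foldl (fun d i =>
    if shift ≠ 0 then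
      let d1 := PySem.List.pySetD d (offset + i)
        (PySem.Int.bor (PySem.List.pyGetD d (offset + i) 0)
          (PySem.Int.band (PySem.List.pyGetD sbyte i 0 >>> shift.toNat) 255))
      PySem.List.pySetD d1 (offset + 1 + i)
        (PySem.Int.bor (PySem.List.pyGetD d1 (offset + 1 + i) 0)
          (PySem.Int.band (PySem.List.pyGetD sbyte i 0 <<< (8 - shift).toNat) 255))
    else
      PySem.List.pySetD d (offset + i) (PySem.List.pyGetD sbyte i 0)) dbyte

-- ===== PORT B =====
def emb_byte_in_byte_alt (dbyte : List Int) (sbyte : List Int) (size : Int) (offset : Int) (shift : Int) : List Int :=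
  let src := PySem.List.slice sbyte none (some (max size 0))
  if src = [] then dbyte
  else if shift = 0 then
    (PySem.List.enumerate src).foldl
      (fun d jv => PySem.List.pySetD d (offset + jv.1) jv.2) dbyte
  else
    let p := (PySem.List.enumerate src).foldl
      (fun (st : List Int × Int) (jv : Int × Int) =>
        let d1 := PySem.List.pySetD st.1 (offset + jv.1)
          (PySem.Int.bor (PySem.List.pyGetD st.1 (offset + jv.1) 0) st.2)
        let d2 := PySem.List.pySetD d1 (offset + jv.1)
          (PySem.Int.bor (PySem.List.pyGetD d1 (offset + jv.1) 0)
            (PySem.Int.band (jv.2 >>> shift.toNat) 255))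
        (d2, PySem.Int.band (jv.2 <<< (8 - shift).toNat) 255))
      (dbyte, 0)
    PySem.List.pySetD p.1 (offset + (src.length : Int))
      (PySem.Int.bor (PySem.List.pyGetD p.1 (offset + (src.length : Int)) 0) p.2)

-- ===== PRECONDITION & SPEC =====
-- Pre_ is exactly the set of inputs on which the Python A returns normally: a nonpositive
-- size runs an empty loop; otherwise every sbyte[i] read and every dbyte write (including
-- Python's negative-index wraparound) must be in range, and for shift != 0 Python's
-- shift operators require 0 <= shift and 0 <= 8 - shift (elsewhere A raises ValueError).
def Pre_emb_byte_in_byte (dbyte : List Int) (sbyte : List Int) (size : Int) (offset : Int) (shift : Int) : Prop :=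
  size ≤ 0 ∨
    (size ≤ (sbyte.length : Int) ∧ -(dbyte.length : Int) ≤ offset ∧
      ((shift = 0 ∧ offset + size ≤ (dbyte.length : Int)) ∨
       (1 ≤ shift ∧ shift ≤ 8 ∧ offset + size + 1 ≤ (dbyte.length : Int))))
instance (dbyte : List Int) (sbyte : List Int) (size : Int) (offset : Int) (shift : Int) : Decidable (Pre_emb_byte_in_byte dbyte sbyte size offset shift) := by unfold Pre_emb_byte_in_byte; infer_instance

def pvWitness_emb_byte_in_byte : List Int × List Int × Int × Int × Int := ([0, 0, 0], [1, 2], 2, 0, 4)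

def Spec_emb_byte_in_byte (dbyte : List Int) (sbyte : List Int) (size : Int) (offset : Int) (shift : Int) (out : List Int) : Prop := out = emb_byte_in_byte_alt dbyte sbyte size offset shift
instance (dbyte : List Int) (sbyte : List Int) (size : Int) (offset : Int) (shift : Int) (out : List Int) : Decidable (Spec_emb_byte_in_byte dbyte sbyte size offset shift out) := by unfold Spec_emb_byte_in_byte; infer_instance

-- ===== CLAIM (what is proved, stated in full; the proofs are below) =====
def Claim_equal_emb_byte_in_byte : Prop := ∀ (dbyte : List Int) (sbyte : List Int) (size : Int) (offset : Int) (shift : Int), Dom_emb_byte_in_byte dbyte sbyte size offset shift → Pre_emb_byte_in_byte dbyte sbyte size offset shift → Spec_emb_byte_in_byte dbyte sbyte size offset shift (emb_byte_in_byte dbyte sbyte size offset shift)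

-- ===== LEMMAS AND PROOFS =====

-- OR-write into position p (Python's "d[p] |= x"), the common shape of both loops.
def pvWr (d : List Int) (p x : Int) : List Int :=
  PySem.List.pySetD d p (PySem.Int.bor (PySem.List.pyGetD d p 0) x)

theorem pvWr_def (d : List Int) (p x : Int) :
    PySem.List.pySetD d p (PySem.Int.bor (PySem.List.pyGetD d p 0) x) = pvWr d p x := rfl

theorem pyIdx?_some_lt {n : Nat} {i : Int} {k : Nat} (h : PySem.List.pyIdx? n i = some k) : k < n := by
  unfold PySem.List.pyIdx? at h
  split_ifs at h <;> simp_all <;> omega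

theorem pvWr_zero (d : List Int) (p : Int) : pvWr d p 0 = d := by
  unfold pvWr
  rw [PySem.Int.bor_zero]
  unfold PySem.List.pySetD PySem.List.pySet? PySem.List.pyGetD PySem.List.pyGet?
  cases h : PySem.List.pyIdx? d.length p with
  | none => simp
  | some k =>
    have hk := pyIdx?_some_lt h
    simp [List.getElem?_eq_getElem hk, List.set_getElem_self]

-- key loop correspondence: B's carry pipeline over the enumerated source, followed by the
-- final carry flush, equals A's two-writes-per-step loop started from one pending OR-write.
theorem pvKey (a b : Int → Int) (o : Int) (l : List Int) :
    ∀ (s : Int) (d : List Int) (c : Int),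
    (let p := (PySem.List.enumerate l s).foldl
        (fun (st : List Int × Int) (jv : Int × Int) =>
          (pvWr (pvWr st.1 (o + jv.1) st.2) (o + jv.1) (a jv.2), b jv.2)) (d, c)
     pvWr p.1 (o + s + (l.length : Int)) p.2)
    = (PySem.List.enumerate l s).foldl
        (fun d0 jv => pvWr (pvWr d0 (o + jv.1) (a jv.2)) (o + 1 + jv.1) (b jv.2))
        (pvWr d (o + s) c) := by
  induction l with
  | nil => intro s d c; simp [PySem.List.enumerate_nil]
  | cons v t ih =>
    intro s d c
    simp only [PySem.List.enumerate_cons, List.foldl_cons, List.length_cons]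
    have h1 : o + 1 + s = o + (s + 1) := by ring
    have h2 : o + s + ((t.length + 1 : Nat) : Int) = o + (s + 1) + (t.length : Int) := by
      push_cast; ring
    rw [h1, h2]
    exact ih (s + 1) (pvWr (pvWr d (o + s) c) (o + s) (a v)) (b v)

theorem pvGetD_take (xs : List Int) (n : Nat) (j : Int) (hn : n ≤ xs.length)
    (h0 : 0 ≤ j) (h1 : j < (n : Int)) :
    PySem.List.pyGetD (List.take n xs) j 0 = PySem.List.pyGetD xs j 0 := by
  have hjn : j < ((List.take n xs).length : Int) := by
    simp [List.length_take]; omega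
  have hj : j < (xs.length : Int) := by omega
  rw [PySem.List.pyGetD_eq_getElem _ _ h0 hjn, PySem.List.pyGetD_eq_getElem _ _ h0 hj]
  exact List.getElem_take

-- ===== VERDICT (by name: the statement is the Claim_ definition above) =====
theorem emb_byte_in_byte_spec : Claim_equal_emb_byte_in_byte := by
  intro dbyte sbyte size offset shift _ hpre
  unfold Spec_emb_byte_in_byte emb_byte_in_byte emb_byte_in_byte_alt
  by_cases h0 : size ≤ 0
  · have hm : max size 0 = 0 := by omega
    rw [PySem.List.pyRange_one_eq_nil h0, hm,
        PySem.List.slice_to sbyte (le_refl (0 : Int))]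
    simp
  · replace h0 : 0 < size := by omega
    have hsz : size ≤ (sbyte.length : Int) := by
      rcases hpre with h | ⟨h, _⟩
      · omega
      · exact h
    have hm : max size 0 = size := by omega
    rw [hm, PySem.List.slice_to sbyte (le_of_lt h0)]
    have hlen : (List.take size.toNat sbyte).length = size.toNat := by
      simp [List.length_take]; omega
    have hne : List.take size.toNat sbyte ≠ [] := by
      intro h; rw [h] at hlen; simp at hlen; omega
    rw [if_neg hne]
    have hcastlen : (((List.take size.toNat sbyte).length : Nat) : Int) = size := by
      rw [hlen]; omega
    by_cases hsh : shift = 0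
    · rw [if_pos hsh]
      simp only [hsh, ne_eq, not_true_eq_false, if_false]
      rw [PySem.List.enumerate_eq_map_pyRange (List.take size.toNat sbyte) 0,
          List.foldl_map, PySem.List.len_eq, hcastlen]
      refine PySem.List.foldl_congr_mem _ _ _ _ ?_
      intro acc x hx
      rw [PySem.List.mem_pyRange_one] at hx
      rw [pvGetD_take sbyte size.toNat x (by omega) hx.1 (by omega)]
    · rw [if_neg hsh]
      simp only [hsh, ne_eq, not_false_eq_true, if_true]
      -- fold B's two let-bound writes into pvWr form and apply the key lemma
      simp only [pvWr_def]
      rw [show offset + (((List.take size.toNat sbyte).length : Nat) : Int)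
            = offset + 0 + (((List.take size.toNat sbyte).length : Nat) : Int) by ring]
      rw [pvKey (fun v => PySem.Int.band (v >>> shift.toNat) 255)
            (fun v => PySem.Int.band (v <<< (8 - shift).toNat) 255)
            offset (List.take size.toNat sbyte) 0 dbyte 0]
      rw [show offset + (0 : Int) = offset by ring, pvWr_zero]
      rw [PySem.List.enumerate_eq_map_pyRange (List.take size.toNat sbyte) 0,
          List.foldl_map, PySem.List.len_eq, hcastlen]
      refine PySem.List.foldl_congr_mem _ _ _ _ ?_
      intro acc x hx
      rw [PySem.List.mem_pyRange_one] at hx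
      rw [pvGetD_take sbyte size.toNat x (by omega) hx.1 (by omega)]
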